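-- pv_equiv track=rewrite | github.com/TomasWard1/python | guias/guia10.py | contar_coincidencias
-- ===== SOURCE A (Python) =====
-- from typing import List
--
-- def contar_coincidencias(xs: List[int]) -> int:
--     '''
--     Requiere: nada
--     Devuelve: la cantidad de veces que xs[i]==i
--     '''
--     if xs == []:
--         return 0
--     elif len(xs) == 1:
--         if xs[0] == 0:
--             return 1
--         else:
--             return 0
--     else:
--         ultimo_i: int = len(xs)-1
--         if xs[ultimo_i] == ultimo_i:
--             return contar_coincidencias(xs[:-1]) + 1
--         else:
--             return contar_coincidencias(xs[:-1])
-- ===== SOURCE B (Python) =====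
-- from typing import List
--
-- def contar_coincidencias(xs: List[int]) -> int:
--     c = 0
--     for i, x in enumerate(xs):
--         if x == i:
--             c += 1
--     return c
-- ===== Notes on version B (the rewrite author's own statement) =====
-- stated objective: faster
-- what changed: Replaces the recursive peel-off-last-element structure (which copies xs[:-1] at every step) with a single iterative pass over enumerate(xs) with a counter.
import Mathlib
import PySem

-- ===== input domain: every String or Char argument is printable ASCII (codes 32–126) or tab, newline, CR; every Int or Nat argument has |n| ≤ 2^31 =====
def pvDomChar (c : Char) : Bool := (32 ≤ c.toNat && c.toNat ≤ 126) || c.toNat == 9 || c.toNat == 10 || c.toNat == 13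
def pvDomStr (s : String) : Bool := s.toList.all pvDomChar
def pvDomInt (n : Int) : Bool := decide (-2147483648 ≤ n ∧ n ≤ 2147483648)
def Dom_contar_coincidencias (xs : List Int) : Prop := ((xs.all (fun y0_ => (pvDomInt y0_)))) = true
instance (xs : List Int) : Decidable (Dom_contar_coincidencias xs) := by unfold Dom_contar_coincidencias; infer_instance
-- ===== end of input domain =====

-- B replaces A's recursive peel-off-last-element (which re-slices xs[:-1] at every step) with one iterative counter pass over enumerate(xs).

-- ===== PORT A =====
def contar_coincidencias (xs : List Int) : Int :=
  if xs = [] then 0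
  else if xs.length = 1 then
    if PySem.List.pyGet? xs 0 = some (0 : Int) then 1 else 0
  else
    let ultimo_i : Int := (xs.length : Int) - 1
    if PySem.List.pyGet? xs ultimo_i = some ultimo_i then
      contar_coincidencias (PySem.List.slice xs none (some (-1))) + 1
    else
      contar_coincidencias (PySem.List.slice xs none (some (-1)))
termination_by xs.length
decreasing_by
  all_goals
    rw [PySem.List.slice_to_neg_one]
    cases xs with
    | nil => simp_all
    | cons a t =>
        simp only [List.length_dropLast, List.length_cons]
        omega

-- ===== PORT B =====
def contar_coincidencias_alt (xs : List Int) : Int :=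
  (PySem.List.enumerate xs).foldl
    (fun c p => if p.2 = p.1 then c + 1 else c) 0

-- ===== PRECONDITION & SPEC =====
def Spec_contar_coincidencias (xs : List Int) (out : Int) : Prop := out = contar_coincidencias_alt xs
instance (xs : List Int) (out : Int) : Decidable (Spec_contar_coincidencias xs out) := by unfold Spec_contar_coincidencias; infer_instance

-- ===== CLAIM (what is proved, stated in full; the proofs are below) =====
def Claim_equal_contar_coincidencias : Prop := ∀ (xs : List Int), Dom_contar_coincidencias xs → Spec_contar_coincidencias xs (contar_coincidencias xs)

-- ===== LEMMAS AND PROOFS =====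

-- B counts the enumeration pairs whose value equals their index.
theorem alt_eq_countP (xs : List Int) :
    contar_coincidencias_alt xs
      = ((PySem.List.enumerate xs).countP (fun p => decide (p.2 = p.1)) : Int) := by
  unfold contar_coincidencias_alt
  rw [PySem.List.foldl_ite_add_one]
  simp

-- A computes the same count, by induction peeling the last element.
theorem a_eq_countP (xs : List Int) :
    contar_coincidencias xs
      = ((PySem.List.enumerate xs).countP (fun p => decide (p.2 = p.1)) : Int) := by
  induction xs using List.reverseRecOn with
  | nil => simp [contar_coincidencias, PySem.List.enumerate_nil]
  | append_singleton ys z ih =>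
    cases ys with
    | nil =>
      simp only [List.nil_append]
      rw [contar_coincidencias]
      by_cases h : z = 0
      · simp [h, PySem.List.pyGet?, PySem.List.pyIdx?, PySem.List.enumerate_cons,
          PySem.List.enumerate_nil]
      · simp [h, PySem.List.pyGet?, PySem.List.pyIdx?, PySem.List.enumerate_cons,
          PySem.List.enumerate_nil]
    | cons a t =>
      rw [contar_coincidencias]
      have hne : (a :: t) ++ [z] ≠ [] := by simp
      have hlen : ((a :: t) ++ [z]).length = t.length + 2 := by simp
      rw [if_neg hne, if_neg (by rw [hlen]; omega)]
      rw [PySem.List.slice_to_neg_one, List.dropLast_concat]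
      have hcast : (((a :: t) ++ [z]).length : Int) - 1 = ((t.length + 1 : Nat) : Int) := by
        rw [hlen]; push_cast; ring
      have hget : PySem.List.pyGet? ((a :: t) ++ [z]) ((((a :: t) ++ [z]).length : Int) - 1)
          = some z := by
        rw [hcast, PySem.List.pyGet?_natCast]
        rw [List.getElem?_append_right (by simp)]
        simp
      rw [PySem.List.enumerate_append, List.countP_append, ih]
      simp only [PySem.List.enumerate_cons, PySem.List.enumerate_nil, List.countP_cons,
        List.countP_nil]
      by_cases hz : z = (((a :: t).length : Int))
      · rw [if_pos (by
          rw [hget, hcast]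
          refine congrArg some ?_
          rw [hz]; push_cast; simp)]
        have hd : (decide (z = 0 + ((a :: t).length : Int))) = true := by
          rw [decide_eq_true_eq]; omega
        simp only [hd, if_true]
        push_cast; ring
      · rw [if_neg (by
          rw [hget, hcast]
          intro hc
          apply hz
          have h2 := Option.some.inj hc
          rw [h2]; simp)]
        have hd : (decide (z = 0 + ((a :: t).length : Int))) = false := by
          rw [decide_eq_false_iff_not]
          intro h; exact hz (by omega)
        simp only [hd]
        simp

-- ===== VERDICT (by name: the statement is the Claim_ definition above) =====
theorem contar_coincidencias_spec : Claim_equal_contar_coincidencias := by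
  intro xs _
  unfold Spec_contar_coincidencias
  rw [alt_eq_countP, a_eq_countP]
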